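-- pv_equiv track=rewrite | github.com/vaskrneup/DataAnalysis | utils/words.py | get_python_var_syntax
-- ===== SOURCE A (Python) =====
-- def get_python_var_syntax(name: str):
--     new_letter = ""
--
--     for letter in name:
--         if letter.isupper():
--             new_letter += letter.lower()
--         elif letter == " ":
--             new_letter += "_"
--         elif not letter.isalpha():
--             continue
--         else:
--             new_letter += letter
--
--     return new_letter
-- ===== SOURCE B (Python) =====
-- def get_python_var_syntax(name: str):
--     words = name.split(" ")
--     cleaned = ["".join(c.lower() for c in w if c.isalpha()) for w in words]
--     return "_".join(cleaned)
-- ===== Notes on version B (the rewrite author's own statement) =====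
-- stated objective: alternative
-- what changed: Replaces the single per-character branch loop by a split-on-single-space / clean-each-word / join-with-underscore pipeline; empty segments are kept so underscore counts match exactly.
import Mathlib
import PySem

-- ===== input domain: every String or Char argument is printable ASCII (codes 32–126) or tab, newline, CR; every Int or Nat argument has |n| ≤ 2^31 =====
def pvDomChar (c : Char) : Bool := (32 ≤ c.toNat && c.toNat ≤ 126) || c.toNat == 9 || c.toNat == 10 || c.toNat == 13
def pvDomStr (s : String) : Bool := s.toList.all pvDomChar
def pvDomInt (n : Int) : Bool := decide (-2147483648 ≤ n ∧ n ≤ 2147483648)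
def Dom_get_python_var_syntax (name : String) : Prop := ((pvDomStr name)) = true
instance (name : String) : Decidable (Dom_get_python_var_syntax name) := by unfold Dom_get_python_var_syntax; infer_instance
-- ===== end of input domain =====

-- B rebuilds the result as split(" ") / keep-lowercased-letters per word / "_".join, instead of A's
-- single per-character branch loop; objective: alternative decomposition, same cost.

-- ===== PORT A =====
-- literal transliteration of A's character loop with string accumulator (over List Char)
def get_python_var_syntax (name : String) : String :=
  String.ofList (name.toList.foldl (fun acc letter =>
    if PySem.Chars.isupper letter then acc ++ [PySem.Chars.lowerChar letter]
    else if letter = ' ' then acc ++ ['_']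
    else if PySem.Chars.isalpha letter = false then acc
    else acc ++ [letter]) [])

-- ===== PORT B =====
-- transliteration of Source B: split on " ", clean each word (keep alphabetic, lowercased), join with "_"
def get_python_var_syntax_alt (name : String) : String :=
  String.ofList (PySem.Chars.join ['_']
    ((PySem.Chars.splitOn name.toList [' ']).map
      (fun w => (w.filter PySem.Chars.isalpha).map PySem.Chars.lowerChar)))

-- ===== PRECONDITION & SPEC =====
def Spec_get_python_var_syntax (name : String) (out : String) : Prop := out = get_python_var_syntax_alt name
instance (name : String) (out : String) : Decidable (Spec_get_python_var_syntax name out) := by unfold Spec_get_python_var_syntax; infer_instance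

-- ===== CLAIM (what is proved, stated in full; the proofs are below) =====
def Claim_equal_get_python_var_syntax : Prop := ∀ (name : String), Dom_get_python_var_syntax name → Spec_get_python_var_syntax name (get_python_var_syntax name)

-- ===== LEMMAS AND PROOFS =====

-- A's per-character contribution
def pvA (c : Char) : List Char :=
  if PySem.Chars.isupper c then [PySem.Chars.lowerChar c]
  else if c = ' ' then ['_']
  else if PySem.Chars.isalpha c = false then []
  else [c]

-- B's per-character contribution inside a word
def pvG (c : Char) : List Char :=
  if PySem.Chars.isalpha c then [PySem.Chars.lowerChar c] else []

-- reference structural split on a single space (proved equal to PySem.Chars.splitOn below)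
def pvSplit (pre : List Char) : List Char → List (List Char)
  | [] => [pre]
  | c :: rest => if c = ' ' then pre :: pvSplit [] rest else pvSplit (pre ++ [c]) rest

lemma pvSplit_ne_nil (pre cs : List Char) : pvSplit pre cs ≠ [] := by
  induction cs generalizing pre with
  | nil => simp [pvSplit]
  | cons c rest ih => simp only [pvSplit]; split <;> simp [ih]

lemma splitOn_go_eq (fuel : Nat) :
    ∀ (l cur : List Char) (accs : List (List Char)), l.length < fuel →
      PySem.Chars.splitOn.go [' '] fuel l cur accs = accs.reverse ++ pvSplit cur.reverse l := by
  induction fuel with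
  | zero => intro l cur accs h; omega
  | succ fuel ih =>
    intro l cur accs h
    cases l with
    | nil => simp [PySem.Chars.splitOn.go, pvSplit]
    | cons c rest =>
      by_cases hc : c = ' '
      · subst hc
        have hpref : List.isPrefixOf [' '] (' ' :: rest) = true := by
          simp [List.isPrefixOf]
        simp only [PySem.Chars.splitOn.go, hpref, if_pos]
        have hdrop : List.drop [' '].length (' ' :: rest) = rest := rfl
        rw [hdrop, ih rest [] (cur.reverse :: accs) (by simp at h ⊢; omega)]
        simp [pvSplit]
      · have hpref : List.isPrefixOf [' '] (c :: rest) = false := by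
          simp [List.isPrefixOf]; exact fun hh => absurd hh.symm hc
        simp only [PySem.Chars.splitOn.go, hpref]
        rw [ih rest (c :: cur) accs (by simp at h ⊢; omega)]
        simp [pvSplit, hc]

lemma splitOn_eq_pvSplit (cs : List Char) :
    PySem.Chars.splitOn cs [' '] = pvSplit [] cs := by
  have := splitOn_go_eq (cs.length + 1) cs [] [] (by omega)
  simpa [PySem.Chars.splitOn] using this

-- B's word cleanup distributes over snoc
lemma clean_snoc (w : List Char) (c : Char) :
    ((w ++ [c]).filter PySem.Chars.isalpha).map PySem.Chars.lowerChar
      = (w.filter PySem.Chars.isalpha).map PySem.Chars.lowerChar ++ pvG c := by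
  by_cases h : PySem.Chars.isalpha c <;> simp [pvG, List.filter_append, h]

-- for non-space characters A's and B's per-character contributions coincide
lemma pvA_eq_pvG (c : Char) (hc : c ≠ ' ') : pvA c = pvG c := by
  unfold pvA pvG
  by_cases hu : PySem.Chars.isupper c
  · simp [hu, PySem.Chars.isalpha]
  · have : PySem.Chars.isalpha c = true → PySem.Chars.lowerChar c = c := by
      intro _; simp [PySem.Chars.lowerChar, hu]
    rcases hA : PySem.Chars.isalpha c with _ | _
    · simp [hu, hc]
    · simp [hu, hc, this hA]

-- the core equation: join-of-cleaned-split equals A's concatenation, with a pending word prefix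
lemma join_split (cs : List Char) : ∀ pre : List Char,
    PySem.Chars.join ['_']
        ((pvSplit pre cs).map (fun w => (w.filter PySem.Chars.isalpha).map PySem.Chars.lowerChar))
      = (pre.filter PySem.Chars.isalpha).map PySem.Chars.lowerChar ++ cs.flatMap pvA := by
  induction cs with
  | nil => intro pre; simp [pvSplit, PySem.Chars.join, List.intercalate]
  | cons c rest ih =>
    intro pre
    by_cases hc : c = ' '
    · subst hc
      rw [show pvSplit pre (' ' :: rest) = pre :: pvSplit [] rest from rfl]
      rcases hne : pvSplit ([] : List Char) rest with _ | ⟨w, ws⟩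
      · exact absurd hne (pvSplit_ne_nil [] rest)
      · have hj := ih []
        rw [hne] at hj
        simp only [List.map_cons] at hj ⊢
        rw [PySem.Chars.join_cons_cons, hj]
        have hA : pvA ' ' = ['_'] := by decide
        simp [hA]
    · simp only [pvSplit, if_neg hc, List.flatMap_cons]
      rw [ih (pre ++ [c]), clean_snoc, pvA_eq_pvG c hc, List.append_assoc]

-- A's loop is the concatenation of per-character contributions
lemma foldl_eq_flatMap (cs : List Char) :
    cs.foldl (fun acc letter =>
      if PySem.Chars.isupper letter then acc ++ [PySem.Chars.lowerChar letter]
      else if letter = ' ' then acc ++ ['_']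
      else if PySem.Chars.isalpha letter = false then acc
      else acc ++ [letter]) [] = cs.flatMap pvA := by
  have hstep : (fun (acc : List Char) (letter : Char) =>
      if PySem.Chars.isupper letter then acc ++ [PySem.Chars.lowerChar letter]
      else if letter = ' ' then acc ++ ['_']
      else if PySem.Chars.isalpha letter = false then acc
      else acc ++ [letter]) = (fun acc letter => acc ++ pvA letter) := by
    funext acc letter; unfold pvA; split_ifs <;> simp
  rw [hstep, PySem.List.foldl_append_eq_flatMap]; simp

-- ===== VERDICT (by name: the statement is the Claim_ definition above) =====
theorem get_python_var_syntax_spec : Claim_equal_get_python_var_syntax := by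
  intro name _
  unfold Spec_get_python_var_syntax get_python_var_syntax get_python_var_syntax_alt
  rw [foldl_eq_flatMap, splitOn_eq_pvSplit, join_split]
  simp
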